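-- pv_equiv track=rewrite | github.com/theosfa/programming | Irina/zadanie domowe1/test.py | codify_string
-- ===== SOURCE A (Python) =====
-- wiersz = 3
--
-- def codify_string(txt: str) ->str:
--     l = ''
--     l1 = ''
--     for i in range(0, len(txt), wiersz + 1):
--
--         l1 = l1.__add__(list(txt)[i])
--     l2 = ''
--     for i in range(1, len(txt), wiersz - 1):
--
--         l2 = l2.__add__(list(txt)[i])
--     l3 = ''
--     for i in range(2, len(txt), wiersz + 1):
--
--         l3 = l3.__add__(list(txt)[i])
--     l = l + l1 + l2 + l3
--     return l
-- ===== SOURCE B (Python) =====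
-- def codify_string(txt: str) -> str:
--     b1 = []
--     b2 = []
--     b3 = []
--     for i, ch in enumerate(txt):
--         if i % 4 == 0:
--             b1.append(ch)
--         elif i % 2 == 1:
--             b2.append(ch)
--         else:
--             b3.append(ch)
--     return ''.join(b1) + ''.join(b2) + ''.join(b3)
-- ===== Notes on version B (the rewrite author's own statement) =====
-- stated objective: simpler
-- what changed: Replaced A's three separate index-stride scans (range(0,n,4), range(1,n,2), range(2,n,4)), each re-materialising list(txt) per index, by a single classifying pass over enumerate(txt) into three buckets joined at the end.
import Mathlib
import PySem

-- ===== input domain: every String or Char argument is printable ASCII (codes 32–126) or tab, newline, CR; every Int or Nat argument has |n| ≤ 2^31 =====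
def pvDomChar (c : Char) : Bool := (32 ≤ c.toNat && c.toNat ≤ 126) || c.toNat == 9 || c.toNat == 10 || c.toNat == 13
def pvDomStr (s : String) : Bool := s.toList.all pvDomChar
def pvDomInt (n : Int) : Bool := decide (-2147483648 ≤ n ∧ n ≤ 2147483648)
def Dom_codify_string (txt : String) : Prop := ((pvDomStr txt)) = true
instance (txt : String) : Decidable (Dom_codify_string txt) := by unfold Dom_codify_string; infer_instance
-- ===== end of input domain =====

-- B replaces A's three separate index-stride scans by one classifying pass over enumerate(txt); same output, simpler single traversal.

-- ===== PORT A =====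
def wiersz : Int := 3

def codify_string (txt : String) : String :=
  let l : String := ""
  let l1 := (PySem.List.pyRange 0 (PySem.List.len txt.toList) (wiersz + 1)).foldl
      (fun s i => s.push (PySem.List.pyGetD txt.toList i ' ')) ""
  let l2 := (PySem.List.pyRange 1 (PySem.List.len txt.toList) (wiersz - 1)).foldl
      (fun s i => s.push (PySem.List.pyGetD txt.toList i ' ')) ""
  let l3 := (PySem.List.pyRange 2 (PySem.List.len txt.toList) (wiersz + 1)).foldl
      (fun s i => s.push (PySem.List.pyGetD txt.toList i ' ')) ""
  l ++ l1 ++ l2 ++ l3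

-- ===== PORT B =====
def codify_string_alt (txt : String) : String :=
  let r := (PySem.List.enumerate txt.toList).foldl
      (fun (acc : String × String × String) p =>
        if p.1 % 4 == 0 then (acc.1.push p.2, acc.2.1, acc.2.2)
        else if p.1 % 2 == 1 then (acc.1, acc.2.1.push p.2, acc.2.2)
        else (acc.1, acc.2.1, acc.2.2.push p.2))
      ("", "", "")
  r.1 ++ r.2.1 ++ r.2.2

-- ===== PRECONDITION & SPEC =====
def Spec_codify_string (txt : String) (out : String) : Prop := out = codify_string_alt txt
instance (txt : String) (out : String) : Decidable (Spec_codify_string txt out) := by unfold Spec_codify_string; infer_instance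

-- ===== CLAIM (what is proved, stated in full; the proofs are below) =====
def Claim_equal_codify_string : Prop := ∀ (txt : String), Dom_codify_string txt → Spec_codify_string txt (codify_string txt)

-- ===== LEMMAS AND PROOFS =====

def pvG1 (p : Int × Char) : Option Char := if p.1 % 4 == 0 then some p.2 else none
def pvG2 (p : Int × Char) : Option Char :=
  if p.1 % 4 == 0 then none else if p.1 % 2 == 1 then some p.2 else none
def pvG3 (p : Int × Char) : Option Char :=
  if p.1 % 4 == 0 then none else if p.1 % 2 == 1 then none else some p.2

lemma pairwise_pyRange_pos (a b t : Int) (ht : 0 < t) :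
    (PySem.List.pyRange a b t).Pairwise (· < ·) := by
  rw [PySem.List.pyRange_of_pos a b ht]
  refine List.Pairwise.map _ ?_ List.pairwise_lt_range
  intro x y hxy
  have hx : (x : Int) < (y : Int) := by exact_mod_cast hxy
  nlinarith

lemma pyRange_pos_filter (a b t : Int) (ht : 0 < t) :
    PySem.List.pyRange a b t
      = (PySem.List.pyRange a b 1).filter (fun x => (x - a) % t == 0) := by
  have h1 : (PySem.List.pyRange a b t).Pairwise (· < ·) := pairwise_pyRange_pos a b t ht
  have h2 : ((PySem.List.pyRange a b 1).filter (fun x => (x - a) % t == 0)).Pairwise (· < ·) :=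
    (pairwise_pyRange_pos a b 1 one_pos).filter _
  have hperm : (PySem.List.pyRange a b t).Perm
      ((PySem.List.pyRange a b 1).filter (fun x => (x - a) % t == 0)) := by
    rw [List.perm_ext_iff_of_nodup h1.nodup h2.nodup]
    intro x
    simp only [PySem.List.mem_pyRange_iff_of_pos ht, List.mem_filter,
      PySem.List.mem_pyRange_one, beq_iff_eq, Int.dvd_iff_emod_eq_zero]
    tauto
  exact List.Perm.eq_of_pairwise (fun a b _ _ h h' => le_antisymm h h')
    (h1.imp le_of_lt) (h2.imp le_of_lt) hperm

lemma filter_shift (q : Int → Bool) (a n : Int) (h0 : 0 ≤ a)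
    (hq : ∀ j, 0 ≤ j → j < a → q j = false) :
    (PySem.List.pyRange 0 n 1).filter q = (PySem.List.pyRange a n 1).filter q := by
  by_cases h : a ≤ n
  · rw [PySem.List.pyRange_one_append 0 a n h0 h, List.filter_append]
    have : (PySem.List.pyRange 0 a 1).filter q = [] := by
      rw [List.filter_eq_nil_iff]
      intro x hx
      rw [PySem.List.mem_pyRange_one] at hx
      simp [hq x hx.1 hx.2]
    simp [this]
  · have h' : n < a := by omega
    rw [PySem.List.pyRange_one_eq_nil (le_of_lt h'), List.filter_nil, List.filter_eq_nil_iff]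
    intro x hx
    rw [PySem.List.mem_pyRange_one] at hx
    simp [hq x hx.1 (lt_trans hx.2 h')]

lemma foldl_push_map (xs : List Char) (d : Char) (idxs : List Int) (s0 : String) :
    (idxs.foldl (fun s i => s.push (PySem.List.pyGetD xs i d)) s0).toList
      = s0.toList ++ idxs.map (fun i => PySem.List.pyGetD xs i d) := by
  induction idxs generalizing s0 with
  | nil => simp
  | cons i tl ih =>
    rw [List.foldl_cons, ih, String.toList_push]
    simp

lemma foldB (l : List (Int × Char)) (a b c : String) :
    ((l.foldl
      (fun (acc : String × String × String) p =>
        if p.1 % 4 == 0 then (acc.1.push p.2, acc.2.1, acc.2.2)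
        else if p.1 % 2 == 1 then (acc.1, acc.2.1.push p.2, acc.2.2)
        else (acc.1, acc.2.1, acc.2.2.push p.2))
      (a, b, c)).1.toList = a.toList ++ l.filterMap pvG1)
    ∧ ((l.foldl
      (fun (acc : String × String × String) p =>
        if p.1 % 4 == 0 then (acc.1.push p.2, acc.2.1, acc.2.2)
        else if p.1 % 2 == 1 then (acc.1, acc.2.1.push p.2, acc.2.2)
        else (acc.1, acc.2.1, acc.2.2.push p.2))
      (a, b, c)).2.1.toList = b.toList ++ l.filterMap pvG2)
    ∧ ((l.foldl
      (fun (acc : String × String × String) p =>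
        if p.1 % 4 == 0 then (acc.1.push p.2, acc.2.1, acc.2.2)
        else if p.1 % 2 == 1 then (acc.1, acc.2.1.push p.2, acc.2.2)
        else (acc.1, acc.2.1, acc.2.2.push p.2))
      (a, b, c)).2.2.toList = c.toList ++ l.filterMap pvG3) := by
  induction l generalizing a b c with
  | nil => simp
  | cons p tl ih =>
    by_cases h1 : (p.1 % 4 == 0) = true
    · have := ih (a.push p.2) b c
      simp only [List.foldl_cons, List.filterMap_cons, pvG1, pvG2, pvG3, h1,
        String.toList_push] at this ⊢
      simp only [List.append_assoc, List.singleton_append] at this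
      exact this
    · by_cases h2 : (p.1 % 2 == 1) = true
      · have := ih a (b.push p.2) c
        simp only [List.foldl_cons, List.filterMap_cons, pvG1, pvG2, pvG3,
          h1, h2, Bool.false_eq_true, String.toList_push] at this ⊢
        simp only [List.append_assoc, List.singleton_append] at this
        exact this
      · have := ih a b (c.push p.2)
        simp only [List.foldl_cons, List.filterMap_cons, pvG1, pvG2, pvG3,
          h1, h2, Bool.false_eq_true, String.toList_push] at this ⊢
        simp only [List.append_assoc, List.singleton_append] at this
        exact this

lemma filterMap_ite {α β : Type} (q : α → Bool) (f : α → β) (l : List α) :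
    l.filterMap (fun x => if q x then some (f x) else none) = (l.filter q).map f := by
  induction l with
  | nil => simp
  | cons x tl ih => by_cases h : q x <;> simp [h, ih]


lemma comp1 (xs : List Char) (d : Char) (l : List Int) :
    l.filterMap (pvG1 ∘ fun j => (j, PySem.List.pyGetD xs j d))
      = (l.filter (fun x => (x - 0) % 4 == 0)).map (fun j => PySem.List.pyGetD xs j d) := by
  rw [← filterMap_ite]
  congr 1
  funext j
  by_cases h1 : j % 4 = 0
  · have h : (j - 0) % 4 = 0 := by omega
    simp [pvG1, Function.comp, h1]
  · have h : (j - 0) % 4 ≠ 0 := by omega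
    simp [pvG1, Function.comp, h1]

lemma comp2 (xs : List Char) (d : Char) (l : List Int) :
    l.filterMap (pvG2 ∘ fun j => (j, PySem.List.pyGetD xs j d))
      = (l.filter (fun x => (x - 1) % 2 == 0)).map (fun j => PySem.List.pyGetD xs j d) := by
  rw [← filterMap_ite]
  congr 1
  funext j
  by_cases h1 : j % 4 = 0
  · have h : (j - 1) % 2 ≠ 0 := by omega
    simp [pvG2, Function.comp, beq_iff_eq, h1, h]
  · by_cases h2 : j % 2 = 1
    · have h : (j - 1) % 2 = 0 := by omega
      simp [pvG2, Function.comp, beq_iff_eq, h1, h2, h]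
    · have h : (j - 1) % 2 ≠ 0 := by omega
      simp [pvG2, Function.comp, beq_iff_eq, h1, h2, h]

lemma comp3 (xs : List Char) (d : Char) (l : List Int) :
    l.filterMap (pvG3 ∘ fun j => (j, PySem.List.pyGetD xs j d))
      = (l.filter (fun x => (x - 2) % 4 == 0)).map (fun j => PySem.List.pyGetD xs j d) := by
  rw [← filterMap_ite]
  congr 1
  funext j
  by_cases h1 : j % 4 = 0
  · have h : (j - 2) % 4 ≠ 0 := by omega
    simp [pvG3, Function.comp, beq_iff_eq, h1, h]
  · by_cases h2 : j % 2 = 1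
    · have h : (j - 2) % 4 ≠ 0 := by omega
      simp [pvG3, Function.comp, beq_iff_eq, h1, h2, h]
    · have h : (j - 2) % 4 = 0 := by omega
      simp [pvG3, Function.comp, beq_iff_eq, h1, h2, h]

-- ===== VERDICT (by name: the statement is the Claim_ definition above) =====
theorem codify_string_spec : Claim_equal_codify_string := by
  intro txt _
  unfold Spec_codify_string
  simp only [codify_string, codify_string_alt, wiersz]
  obtain ⟨hb1, hb2, hb3⟩ := foldB (PySem.List.enumerate txt.toList) "" "" ""
  apply String.ext
  simp only [String.toList_append, hb1, hb2, hb3, String.toList_empty, List.nil_append,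
    foldl_push_map txt.toList ' ']
  norm_num
  have hq1 : ∀ j : Int, 0 ≤ j → j < 1 → ((j - 1) % 2 == 0) = false := by
    intro j hj1 hj2
    have : j = 0 := by omega
    subst this
    decide
  have hq2 : ∀ j : Int, 0 ≤ j → j < 2 → ((j - 2) % 4 == 0) = false := by
    intro j hj1 hj2
    have : j = 0 ∨ j = 1 := by omega
    rcases this with h | h <;> subst h <;> decide
  rw [PySem.List.enumerate_eq_map_pyRange txt.toList ' ',
    List.filterMap_map, List.filterMap_map, List.filterMap_map,
    comp1 txt.toList ' ', comp2 txt.toList ' ', comp3 txt.toList ' ',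
    pyRange_pos_filter 0 _ 4 (by norm_num),
    pyRange_pos_filter 1 _ 2 (by norm_num),
    pyRange_pos_filter 2 _ 4 (by norm_num),
    ← filter_shift _ 1 _ (by norm_num) hq1,
    ← filter_shift _ 2 _ (by norm_num) hq2]
  simp
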